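-- pv_equiv track=rewrite | github.com/lukeheary/DCN_Project2 | HealthServ.py | calculateDates
-- ===== SOURCE A (Python) =====
-- def calculateDates(samples):
--     dates = []
--     returnDates = []
--     for sample in samples:
--         dates.append(sample[2])
--
--     returnDates.append(min(dates))
--     returnDates.append(max(dates))
--     return returnDates
-- ===== SOURCE B (Python) =====
-- def calculateDates(samples):
--     if not samples:
--         raise ValueError("min() arg is an empty sequence")
--     lo = hi = samples[0][2]
--     for sample in samples[1:]:
--         d = sample[2]
--         if d < lo:
--             lo = d
--         if d > hi:
--             hi = d
--     return [lo, hi]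
-- ===== Notes on version B (the rewrite author's own statement) =====
-- stated objective: alternative
-- what changed: B computes both extremes in one running-min/max pass over the samples instead of materialising the list of dates and scanning it twice with min() and max().
import Mathlib
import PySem

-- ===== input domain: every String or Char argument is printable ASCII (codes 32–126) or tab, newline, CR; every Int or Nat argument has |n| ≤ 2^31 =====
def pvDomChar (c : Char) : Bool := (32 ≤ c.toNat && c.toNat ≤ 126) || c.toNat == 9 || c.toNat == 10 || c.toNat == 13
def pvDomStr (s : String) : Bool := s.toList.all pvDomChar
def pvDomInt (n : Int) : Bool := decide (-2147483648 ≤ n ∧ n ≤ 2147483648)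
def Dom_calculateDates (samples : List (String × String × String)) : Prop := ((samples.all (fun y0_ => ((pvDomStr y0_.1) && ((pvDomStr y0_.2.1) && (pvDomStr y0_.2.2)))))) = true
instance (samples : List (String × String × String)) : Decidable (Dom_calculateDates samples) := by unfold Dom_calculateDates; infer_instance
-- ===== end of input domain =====

-- B computes both extremes in one running min/max pass instead of building the date list and scanning it twice (alternative decomposition, same O(n) cost).

-- ===== PORT A =====
def calculateDates (samples : List (String × String × String)) : List String :=
  let dates := samples.foldl (fun acc sample => acc ++ [sample.2.2]) ([] : List String)
  let returnDates : List String := []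
  -- min(dates)/max(dates) raise ValueError on [] — excluded by Pre_; getD "" is unreachable under Pre_
  let returnDates := returnDates ++ [(PySem.List.min? dates (fun x => x)).getD ""]
  let returnDates := returnDates ++ [(PySem.List.max? dates (fun x => x)).getD ""]
  returnDates

-- ===== PORT B =====
def calculateDates_alt (samples : List (String × String × String)) : List String :=
  match samples with
  | [] => []  -- B raises ValueError here (outside Pre_)
  | s :: rest =>
    let p := rest.foldl (fun (p : String × String) sample =>
        let d := sample.2.2
        let p := if d < p.1 then (d, p.2) else p
        if p.2 < d then (p.1, d) else p) (s.2.2, s.2.2)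
    [p.1, p.2]

-- ===== PRECONDITION & SPEC =====
-- Pre_ excludes only the empty list, on which A raises ValueError (min of an empty sequence).
def Pre_calculateDates (samples : List (String × String × String)) : Prop := samples ≠ []
instance (samples : List (String × String × String)) : Decidable (Pre_calculateDates samples) := by unfold Pre_calculateDates; infer_instance
def pvWitness_calculateDates : (List (String × String × String)) := [("a", "b", "2019-01-02"), ("c", "d", "2018-12-31")]

def Spec_calculateDates (samples : List (String × String × String)) (out : List String) : Prop := out = calculateDates_alt samples
instance (samples : List (String × String × String)) (out : List String) : Decidable (Spec_calculateDates samples out) := by unfold Spec_calculateDates; infer_instance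

-- ===== CLAIM (what is proved, stated in full; the proofs are below) =====
def Claim_equal_calculateDates : Prop := ∀ (samples : List (String × String × String)), Dom_calculateDates samples → Pre_calculateDates samples → Spec_calculateDates samples (calculateDates samples)

-- ===== LEMMAS AND PROOFS =====

theorem pv_fold_append (l : List (String × String × String)) (acc : List String) :
    l.foldl (fun acc sample => acc ++ [sample.2.2]) acc = acc ++ l.map (fun s => s.2.2) := by
  induction l generalizing acc with
  | nil => simp
  | cons h t ih => simp [List.foldl, ih]

theorem pv_min (a d : String) : (if d < a then d else a) = min a d := by
  by_cases h : d < a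
  · simp [h, min_eq_right h.le]
  · simp [h, min_eq_left (not_lt.mp h)]

theorem pv_max (b d : String) : (if b < d then d else b) = max b d := by
  by_cases h : b < d
  · simp [h, max_eq_right h.le]
  · simp [h, max_eq_left (not_lt.mp h)]

theorem pv_fold_pair (l : List (String × String × String)) (a b : String) :
    l.foldl (fun (p : String × String) sample =>
        let d := sample.2.2
        let p := if d < p.1 then (d, p.2) else p
        if p.2 < d then (p.1, d) else p) (a, b)
    = (l.foldl (fun x sample => min x sample.2.2) a,
       l.foldl (fun x sample => max x sample.2.2) b) := by
  induction l generalizing a b with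
  | nil => rfl
  | cons h t ih =>
    simp only [List.foldl]
    rw [← ih]
    congr 1
    by_cases h1 : h.2.2 < a <;> by_cases h2 : b < h.2.2 <;>
      simp only [h1, h2, if_true, if_false, ite_true, ite_false, if_pos, if_neg] <;>
      simp [h1, h2, ← pv_min, ← pv_max]

-- ===== VERDICT (by name: the statement is the Claim_ definition above) =====
theorem calculateDates_spec : Claim_equal_calculateDates := by
  intro samples _ hpre
  unfold Spec_calculateDates calculateDates calculateDates_alt
  match samples with
  | [] => exact absurd rfl hpre
  | s :: rest =>
    simp only [pv_fold_append, List.nil_append, List.map_cons,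
      PySem.List.min?_id_cons, PySem.List.max?_id_cons, Option.getD_some, pv_fold_pair,
      List.foldl_map]
    rfl
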